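-- pv_equiv track=rewrite | github.com/vicenledesma/GPCRmd | view/views.py | find_missing_pos_in_motif_otherclass
-- ===== SOURCE A (Python) =====
-- def find_missing_pos_in_motif_otherclass(motifs, motname_li,dict_class,current_class):
--     """Given a list of positions in conserved motifs, where the positions found at our sequence are indicated, creates a list of motifs where the positions found at our sequence are indicated, showing if they have the conserves AA or another one."""
--     motifs_def=[]
--     n=0
--     for motname in motname_li:
--         found=[]
--         found_ranges=[]
--         not_found=[]
--         for e in motifs:
--             if e[0]==motname:
--                 if not e[2]:
--                     not_found.append(e[1])
--                 else:
--                     motpos= e[1] + current_class.lower() + " = " + e[4] +dict_class.lower()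
--                     found.append(motpos)
--                     found_ranges.append(e[3])
--
--         num_nf=len(not_found)
--         ranges_all=",".join(found_ranges)
--         if num_nf ==0:
--             motifs_def.append([motname," ; ".join(found),(ranges_all)])
--         elif num_nf ==3:
--             motifs_def.append([motname,"Motif not found","None"])
--         else:
--             motifs_def.append([motname,(" ; ".join(found) + " (" + " , ".join(not_found) + " not found)"),(ranges_all)])
--         n+=1
--     return motifs_def
-- ===== SOURCE B (Python) =====
-- def find_missing_pos_in_motif_otherclass(motifs, motname_li, dict_class, current_class):
--     cc = current_class.lower()
--     dc = dict_class.lower()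
--     # one grouping pass: name -> (found, found_ranges, not_found)
--     buckets = {}
--     for name, pos, hit, rng, aa in motifs:
--         found, ranges, not_found = buckets.setdefault(name, ([], [], []))
--         if hit:
--             found.append(pos + cc + " = " + aa + dc)
--             ranges.append(rng)
--         else:
--             not_found.append(pos)
--     # formatting pass over the requested names
--     def fmt(motname):
--         found, ranges, not_found = buckets.get(motname, ([], [], []))
--         if not not_found:
--             return [motname, " ; ".join(found), ",".join(ranges)]
--         if len(not_found) == 3:
--             return [motname, "Motif not found", "None"]
--         return [motname,
--                 " ; ".join(found) + " (" + " , ".join(not_found) + " not found)",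
--                 ",".join(ranges)]
--     return [fmt(m) for m in motname_li]
-- ===== Notes on version B (the rewrite author's own statement) =====
-- stated objective: faster
-- what changed: B replaces A's per-name rescan of the whole motifs list by one grouping pass into a name-keyed dict of (found, ranges, not_found) buckets followed by a formatting pass over motname_li.
import Mathlib
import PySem

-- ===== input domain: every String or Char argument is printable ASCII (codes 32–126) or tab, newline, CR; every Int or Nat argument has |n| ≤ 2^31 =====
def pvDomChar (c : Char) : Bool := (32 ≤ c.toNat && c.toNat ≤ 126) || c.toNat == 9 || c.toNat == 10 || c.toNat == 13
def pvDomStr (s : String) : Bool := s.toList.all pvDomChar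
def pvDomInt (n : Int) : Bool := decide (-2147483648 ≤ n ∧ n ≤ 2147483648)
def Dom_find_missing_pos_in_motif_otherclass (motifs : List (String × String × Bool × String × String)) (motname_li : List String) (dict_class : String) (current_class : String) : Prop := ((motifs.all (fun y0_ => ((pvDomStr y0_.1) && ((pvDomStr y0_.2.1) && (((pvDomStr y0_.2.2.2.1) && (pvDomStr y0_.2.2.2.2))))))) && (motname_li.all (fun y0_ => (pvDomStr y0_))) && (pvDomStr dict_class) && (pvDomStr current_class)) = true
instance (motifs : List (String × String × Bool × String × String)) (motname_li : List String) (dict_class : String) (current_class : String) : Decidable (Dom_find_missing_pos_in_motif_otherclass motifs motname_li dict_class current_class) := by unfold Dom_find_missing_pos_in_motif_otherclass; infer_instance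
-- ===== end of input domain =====

-- B replaces A's per-name rescan of motifs by one dict-grouping pass plus a formatting pass (asymptotically faster).

-- ===== PORT A =====
-- literal transliteration of A: for each motname, an inner loop over motifs collects
-- (found, found_ranges, not_found), then the row is appended to motifs_def.
def find_missing_pos_in_motif_otherclass (motifs : List (String × String × Bool × String × String)) (motname_li : List String) (dict_class : String) (current_class : String) : List (List String) :=
  motname_li.foldl (fun motifs_def motname =>
    let st := motifs.foldl (fun (st : List String × List String × List String) e =>
      if e.1 == motname then
        if !e.2.2.1 then
          (st.1, st.2.1, st.2.2 ++ [e.2.1])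
        else
          let motpos := e.2.1 ++ PySem.Str.lower current_class ++ " = " ++ e.2.2.2.2 ++ PySem.Str.lower dict_class
          (st.1 ++ [motpos], st.2.1 ++ [e.2.2.2.1], st.2.2)
      else st) ([], [], [])
    let found := st.1
    let found_ranges := st.2.1
    let not_found := st.2.2
    let num_nf := not_found.length
    let ranges_all := PySem.Str.join "," found_ranges
    if num_nf == 0 then
      motifs_def ++ [[motname, PySem.Str.join " ; " found, ranges_all]]
    else if num_nf == 3 then
      motifs_def ++ [[motname, "Motif not found", "None"]]
    else
      motifs_def ++ [[motname, PySem.Str.join " ; " found ++ " (" ++ PySem.Str.join " , " not_found ++ " not found)", ranges_all]]) []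

-- ===== PORT B =====
-- grouping pass: name -> (found, found_ranges, not_found)
def fmGroup (motifs : List (String × String × Bool × String × String)) (cc dc : String) : PySem.Dict String (List String × List String × List String) :=
  motifs.foldl (fun d e =>
    let b := d.getD e.1 ([], [], [])
    d.insert e.1 (if e.2.2.1 then
        (b.1 ++ [e.2.1 ++ cc ++ " = " ++ e.2.2.2.2 ++ dc], b.2.1 ++ [e.2.2.2.1], b.2.2)
      else
        (b.1, b.2.1, b.2.2 ++ [e.2.1]))) PySem.Dict.empty

-- formatting pass
def fmFmt (motname : String) (b : List String × List String × List String) : List String :=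
  if b.2.2.length == 0 then
    [motname, PySem.Str.join " ; " b.1, PySem.Str.join "," b.2.1]
  else if b.2.2.length == 3 then
    [motname, "Motif not found", "None"]
  else
    [motname, PySem.Str.join " ; " b.1 ++ " (" ++ PySem.Str.join " , " b.2.2 ++ " not found)", PySem.Str.join "," b.2.1]

def find_missing_pos_in_motif_otherclass_alt (motifs : List (String × String × Bool × String × String)) (motname_li : List String) (dict_class : String) (current_class : String) : List (List String) :=
  let d := fmGroup motifs (PySem.Str.lower current_class) (PySem.Str.lower dict_class)
  motname_li.map (fun motname => fmFmt motname (d.getD motname ([], [], [])))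

-- ===== PRECONDITION & SPEC =====
def Spec_find_missing_pos_in_motif_otherclass (motifs : List (String × String × Bool × String × String)) (motname_li : List String) (dict_class : String) (current_class : String) (out : List (List String)) : Prop := out = find_missing_pos_in_motif_otherclass_alt motifs motname_li dict_class current_class
instance (motifs : List (String × String × Bool × String × String)) (motname_li : List String) (dict_class : String) (current_class : String) (out : List (List String)) : Decidable (Spec_find_missing_pos_in_motif_otherclass motifs motname_li dict_class current_class out) := by unfold Spec_find_missing_pos_in_motif_otherclass; infer_instance

-- ===== CLAIM (what is proved, stated in full; the proofs are below) =====
def Claim_equal_find_missing_pos_in_motif_otherclass : Prop := ∀ (motifs : List (String × String × Bool × String × String)) (motname_li : List String) (dict_class : String) (current_class : String), Dom_find_missing_pos_in_motif_otherclass motifs motname_li dict_class current_class → Spec_find_missing_pos_in_motif_otherclass motifs motname_li dict_class current_class (find_missing_pos_in_motif_otherclass motifs motname_li dict_class current_class)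

-- ===== LEMMAS AND PROOFS =====

-- the bucket the grouping dict holds for `name` is exactly what A's inner loop computes
theorem fmGroup_getD (motifs : List (String × String × Bool × String × String)) (cc dc name : String)
    (d : PySem.Dict String (List String × List String × List String)) :
    (motifs.foldl (fun d e =>
      let b := d.getD e.1 ([], [], [])
      d.insert e.1 (if e.2.2.1 then
          (b.1 ++ [e.2.1 ++ cc ++ " = " ++ e.2.2.2.2 ++ dc], b.2.1 ++ [e.2.2.2.1], b.2.2)
        else
          (b.1, b.2.1, b.2.2 ++ [e.2.1]))) d).getD name ([], [], []) =
    motifs.foldl (fun (st : List String × List String × List String) e =>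
      if e.1 == name then
        if !e.2.2.1 then
          (st.1, st.2.1, st.2.2 ++ [e.2.1])
        else
          (st.1 ++ [e.2.1 ++ cc ++ " = " ++ e.2.2.2.2 ++ dc], st.2.1 ++ [e.2.2.2.1], st.2.2)
      else st) (d.getD name ([], [], [])) := by
  induction motifs generalizing d with
  | nil => rfl
  | cons e rest ih =>
    simp only [List.foldl_cons]
    rw [ih, PySem.Dict.getD_insert]
    by_cases h : name = e.1
    · subst h
      simp only [beq_self_eq_true, if_true]
      cases e.2.2.1 <;> rfl
    · have h2 : (e.1 == name) = false := by simpa using fun hh => h hh.symm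
      simp [h, h2]

-- A's outer loop, generalized over the accumulator, equals B's map over motname_li
theorem A_foldl_eq (motifs : List (String × String × Bool × String × String)) (dict_class current_class : String) (li : List String) (acc : List (List String)) :
    li.foldl (fun motifs_def motname =>
      let st := motifs.foldl (fun (st : List String × List String × List String) e =>
        if e.1 == motname then
          if !e.2.2.1 then
            (st.1, st.2.1, st.2.2 ++ [e.2.1])
          else
            let motpos := e.2.1 ++ PySem.Str.lower current_class ++ " = " ++ e.2.2.2.2 ++ PySem.Str.lower dict_class
            (st.1 ++ [motpos], st.2.1 ++ [e.2.2.2.1], st.2.2)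
        else st) ([], [], [])
      let found := st.1
      let found_ranges := st.2.1
      let not_found := st.2.2
      let num_nf := not_found.length
      let ranges_all := PySem.Str.join "," found_ranges
      if num_nf == 0 then
        motifs_def ++ [[motname, PySem.Str.join " ; " found, ranges_all]]
      else if num_nf == 3 then
        motifs_def ++ [[motname, "Motif not found", "None"]]
      else
        motifs_def ++ [[motname, PySem.Str.join " ; " found ++ " (" ++ PySem.Str.join " , " not_found ++ " not found)", ranges_all]]) acc
    = acc ++ li.map (fun motname => fmFmt motname ((fmGroup motifs (PySem.Str.lower current_class) (PySem.Str.lower dict_class)).getD motname ([], [], []))) := by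
  induction li generalizing acc with
  | nil => simp
  | cons motname rest ih =>
    simp only [List.foldl_cons, List.map_cons]
    rw [ih]
    have hb : (fmGroup motifs (PySem.Str.lower current_class) (PySem.Str.lower dict_class)).getD motname ([], [], [])
        = motifs.foldl (fun (st : List String × List String × List String) e =>
            if e.1 == motname then
              if !e.2.2.1 then
                (st.1, st.2.1, st.2.2 ++ [e.2.1])
              else
                (st.1 ++ [e.2.1 ++ PySem.Str.lower current_class ++ " = " ++ e.2.2.2.2 ++ PySem.Str.lower dict_class], st.2.1 ++ [e.2.2.2.1], st.2.2)
            else st) ([], [], []) := by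
      unfold fmGroup
      rw [fmGroup_getD]
      rw [PySem.Dict.getD_empty]
    simp only [fmFmt, hb]
    split_ifs <;> simp_all

-- ===== VERDICT (by name: the statement is the Claim_ definition above) =====
theorem find_missing_pos_in_motif_otherclass_spec : Claim_equal_find_missing_pos_in_motif_otherclass := by
  intro motifs motname_li dict_class current_class _
  show _ = _
  unfold find_missing_pos_in_motif_otherclass find_missing_pos_in_motif_otherclass_alt
  rw [A_foldl_eq]
  simp
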